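-- pv_equiv track=rewrite | github.com/kdmalc/data-structs-algos | CS2204/CS_HW7/pizza.py | pizza_preparator
-- ===== SOURCE A (Python) =====
-- def pizza_preparator(dough, sauce, cheese):
--     """
--     Generate as many "raw_pizza" strings as possible by consuming one element
--     from the dough and sauce iterators (each) and consuming five (5) elements
--     form the cheese iterator.
--     """
--     dough_str = iter(dough)
--     sauce_str = iter(sauce)
--     cheese_str = iter(cheese)
--
--     while True:
--         try:
--             dough_cond = next(dough_str) is not None
--             sauce_cond = next(sauce_str) is not None
--             for _ in range(5):
--                 next(cheese_str)
--             cheese_cond = True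
--             if (dough_cond and sauce_cond and cheese_cond):
--                 yield "raw_pizza"
--         except StopIteration:
--             break
-- ===== SOURCE B (Python) =====
-- def pizza_preparator(dough, sauce, cheese):
--     """Closed-form count of rounds: one dough, one sauce, five cheese each;
--     then yield per index where both dough and sauce are not None."""
--     dough = list(dough)
--     sauce = list(sauce)
--     n = min(len(dough), len(sauce), sum(1 for _ in cheese) // 5)
--     for i in range(n):
--         if dough[i] is not None and sauce[i] is not None:
--             yield "raw_pizza"
-- ===== Notes on version B (the rewrite author's own statement) =====
-- stated objective: simpler
-- what changed: Replaces the while/try/except iterator-consumption loop with a closed-form round count n = min(len(dough), len(sauce), len(cheese)//5) and a single indexed loop yielding where both dough[i] and sauce[i] are non-None.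
import Mathlib
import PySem

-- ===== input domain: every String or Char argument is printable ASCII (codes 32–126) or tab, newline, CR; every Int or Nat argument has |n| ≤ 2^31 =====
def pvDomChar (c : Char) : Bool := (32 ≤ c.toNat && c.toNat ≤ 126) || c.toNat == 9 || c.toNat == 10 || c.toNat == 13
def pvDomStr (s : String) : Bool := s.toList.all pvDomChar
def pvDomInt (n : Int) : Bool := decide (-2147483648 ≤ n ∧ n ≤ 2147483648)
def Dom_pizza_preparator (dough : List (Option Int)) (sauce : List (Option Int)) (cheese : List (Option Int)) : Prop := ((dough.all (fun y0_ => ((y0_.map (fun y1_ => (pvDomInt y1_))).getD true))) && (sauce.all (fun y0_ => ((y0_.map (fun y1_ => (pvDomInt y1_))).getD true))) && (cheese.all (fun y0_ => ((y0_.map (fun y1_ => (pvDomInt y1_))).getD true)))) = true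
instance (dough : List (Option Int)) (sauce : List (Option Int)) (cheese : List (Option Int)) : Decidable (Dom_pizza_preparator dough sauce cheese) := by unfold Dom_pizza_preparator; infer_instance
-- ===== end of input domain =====

-- B replaces A's while/try/except consumption loop with a closed-form round count
-- n = min(len dough, len sauce, len cheese // 5) and one indexed pass (simpler).


-- ===== PORT A =====
-- A's 'while True' with try/except StopIteration: each round takes one dough, one
-- sauce, then five cheese; any failing 'next' ends the generator. The three list
-- arguments are the remaining-iterator states.
def pizzaLoopA : List (Option Int) → List (Option Int) → List (Option Int) → List String
  | d :: dt, s :: st, ch =>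
    if 5 ≤ ch.length then
      let rest := pizzaLoopA dt st (ch.drop 5)
      if d.isSome && s.isSome then "raw_pizza" :: rest else rest
    else []
  | _, _, _ => []

def pizza_preparator (dough : List (Option Int)) (sauce : List (Option Int)) (cheese : List (Option Int)) : List String :=
  pizzaLoopA dough sauce cheese

-- ===== PORT B =====
-- B: n = min(len(dough), len(sauce), len(cheese)//5); for i in range(n): yield if both non-None.
def pizza_preparator_alt (dough : List (Option Int)) (sauce : List (Option Int)) (cheese : List (Option Int)) : List String :=
  let n := min (min dough.length sauce.length) (cheese.length / 5)
  (PySem.List.pyRange 0 (n : Int) 1).foldl (fun acc i =>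
    if (PySem.List.pyGetD dough i none).isSome && (PySem.List.pyGetD sauce i none).isSome then
      acc ++ ["raw_pizza"]
    else acc) []

-- ===== PRECONDITION & SPEC =====
def Spec_pizza_preparator (dough : List (Option Int)) (sauce : List (Option Int)) (cheese : List (Option Int)) (out : List String) : Prop := out = pizza_preparator_alt dough sauce cheese
instance (dough : List (Option Int)) (sauce : List (Option Int)) (cheese : List (Option Int)) (out : List String) : Decidable (Spec_pizza_preparator dough sauce cheese out) := by unfold Spec_pizza_preparator; infer_instance

-- ===== CLAIM (what is proved, stated in full; the proofs are below) =====
def Claim_equal_pizza_preparator : Prop := ∀ (dough : List (Option Int)) (sauce : List (Option Int)) (cheese : List (Option Int)), Dom_pizza_preparator dough sauce cheese → Spec_pizza_preparator dough sauce cheese (pizza_preparator dough sauce cheese)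

-- ===== LEMMAS AND PROOFS =====

-- common characterisation: n rounds over the two toppings lists
def pizzaRounds : Nat → List (Option Int) → List (Option Int) → List String
  | n + 1, d :: dt, s :: st =>
      if d.isSome && s.isSome then "raw_pizza" :: pizzaRounds n dt st
      else pizzaRounds n dt st
  | _, _, _ => []

theorem pizzaLoopA_eq_rounds (d s c : List (Option Int)) :
    pizzaLoopA d s c = pizzaRounds (min (min d.length s.length) (c.length / 5)) d s := by
  induction d generalizing s c with
  | nil => simp [pizzaLoopA, pizzaRounds]
  | cons x dt ih =>
    cases s with
    | nil => simp [pizzaLoopA, pizzaRounds]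
    | cons y st =>
      by_cases h : 5 ≤ c.length
      · have hlen : (c.drop 5).length = c.length - 5 := by simp
        have hn : min (min (dt.length + 1) (st.length + 1)) (c.length / 5)
            = min (min dt.length st.length) ((c.drop 5).length / 5) + 1 := by
          rw [hlen]; omega
        simp only [pizzaLoopA, if_pos h, List.length_cons, hn, pizzaRounds, ih]
      · have hz : c.length / 5 = 0 := by omega
        simp [pizzaLoopA, h, hz, pizzaRounds]

theorem rangeFold_eq_rounds (n : Nat) (d s : List (Option Int)) (acc : List String)
    (hd : n ≤ d.length) (hs : n ≤ s.length) :
    (List.range n).foldl (fun acc k =>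
        if (d.getD k none).isSome && (s.getD k none).isSome then acc ++ ["raw_pizza"] else acc) acc
      = acc ++ pizzaRounds n d s := by
  induction n generalizing d s acc with
  | zero => simp [pizzaRounds]
  | succ m ih =>
    cases d with
    | nil => simp at hd
    | cons x dt =>
      cases s with
      | nil => simp at hs
      | cons y st =>
        rw [List.range_succ_eq_map]
        simp only [List.foldl_cons, List.foldl_map, List.getD_cons_zero, List.getD_cons_succ]
        simp only [pizzaRounds]
        by_cases hx : x.isSome && y.isSome
        · rw [if_pos hx, if_pos hx, ih dt st _ (by simpa using hd) (by simpa using hs)]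
          simp
        · rw [if_neg hx, if_neg hx, ih dt st _ (by simpa using hd) (by simpa using hs)]

theorem alt_eq_rounds (d s c : List (Option Int)) :
    pizza_preparator_alt d s c = pizzaRounds (min (min d.length s.length) (c.length / 5)) d s := by
  unfold pizza_preparator_alt
  simp only []
  generalize hn : min (min d.length s.length) (c.length / 5) = n
  rw [PySem.List.pyRange_one]
  simp only [Int.sub_zero, Int.toNat_natCast, List.foldl_map, Int.zero_add,
    PySem.List.pyGetD_natCast]
  exact rangeFold_eq_rounds n d s [] (by omega) (by omega)

-- ===== VERDICT (by name: the statement is the Claim_ definition above) =====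
theorem pizza_preparator_spec : Claim_equal_pizza_preparator := by
  intro d s c _
  unfold Spec_pizza_preparator pizza_preparator
  rw [pizzaLoopA_eq_rounds, alt_eq_rounds]
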